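-- pv_equiv track=rewrite | github.com/KennethGalvez/LabE-LP | afn.py | primera_funcion
-- ===== SOURCE A (Python) =====
-- def procesar(producciones):
--     no_terminales = set(producciones.keys())
--     terminales = set()
--
--     for lista_producciones in producciones.values():
--         for produccion in lista_producciones:
--             terminales.update(simbolo for simbolo in produccion if simbolo not in no_terminales)
--
--     return terminales, no_terminales
--
-- def primera_funcion(producciones):
--     terminales, no_terminales = procesar(producciones)
--     first = {no_terminal: set() for no_terminal in no_terminales}
--
--     cambiado = True
--     while cambiado:
--         cambiado = False
--         for no_terminal, lista_producciones in producciones.items():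
--             for produccion in lista_producciones:
--                 for simbolo in produccion:
--                     if simbolo in terminales:
--                         if simbolo not in first[no_terminal]:
--                             first[no_terminal].add(simbolo)
--                             cambiado = True
--                         break
--                     else:
--                         agregados = len(first[no_terminal])
--                         first[no_terminal].update(first[simbolo] - {None})
--                         if len(first[no_terminal]) != agregados:
--                             cambiado = True
--                         if None not in first[simbolo]:
--                             break
--                 else:
--                     if None not in first[no_terminal]:
--                         first[no_terminal].add(None)
--                         cambiado = True
--
--     return first
-- ===== SOURCE B (Python) =====
-- def primera_funcion(producciones):
--     # Same FIRST-set fixpoint, but: a symbol is a terminal iff it is not a key of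
--     # `producciones` (no precomputed terminal set), the walk along a production is a
--     # small recursive helper instead of a for/break/else, and a round's progress is
--     # detected by comparing the total number of stored symbols (the table only ever
--     # grows) instead of threading a `cambiado` flag through the loops.
--     first = {x: set() for x in producciones}
--
--     def absorb(x, syms):
--         if not syms:
--             first[x].add(None)
--             return
--         sym = syms[0]
--         if sym in first:
--             first[x] |= first[sym] - {None}
--             if None in first[sym]:
--                 absorb(x, syms[1:])
--         else:
--             first[x].add(sym)
--
--     while True:
--         size = sum(len(s) for s in first.values())
--         for x, prods in producciones.items():
--             for prod in prods:
--                 absorb(x, prod)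
--         if sum(len(s) for s in first.values()) == size:
--             return first
-- ===== Notes on version B (the rewrite author's own statement) =====
-- stated objective: simpler
-- what changed: B drops the procesar/terminal-set precomputation (a symbol is terminal iff it is not a key of producciones), replaces the cambiado flag threaded through three nested loops and the for/break/else walk by a small recursive helper per production, and detects a finished round by comparing the total number of stored symbols, exploiting that the table only grows.
import Mathlib
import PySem

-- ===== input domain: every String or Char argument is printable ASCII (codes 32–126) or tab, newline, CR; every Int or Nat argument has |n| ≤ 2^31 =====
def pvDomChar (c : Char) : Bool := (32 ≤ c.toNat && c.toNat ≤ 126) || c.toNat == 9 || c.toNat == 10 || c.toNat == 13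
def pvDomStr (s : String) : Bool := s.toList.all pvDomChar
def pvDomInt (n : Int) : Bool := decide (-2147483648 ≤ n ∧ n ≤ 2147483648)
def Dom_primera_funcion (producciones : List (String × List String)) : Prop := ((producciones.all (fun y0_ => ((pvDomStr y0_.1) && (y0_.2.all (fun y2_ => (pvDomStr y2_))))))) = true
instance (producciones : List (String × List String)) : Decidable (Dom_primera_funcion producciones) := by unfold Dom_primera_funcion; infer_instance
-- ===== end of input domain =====

-- B computes the same FIRST fixpoint but tests terminality by key lookup instead of a
-- precomputed terminal set, walks each production recursively instead of for/break/else
-- with a cambiado flag, and stops when a round adds no symbol (total size unchanged);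
-- same cost, shorter code.

-- ===== PORT A =====
-- FIRST table: dict nonterminal -> Python set of terminals/None (PySem.Set: a
-- distinct-element list in insertion order).
abbrev PVSt := PySem.Dict String (List (Option String))

-- symbols of a production: Python iterates a str by characters (1-char strings); exact.
def pvSyms (prod : String) : List String := prod.toList.map String.singleton

def pvNts (producciones : List (String × List String)) : PySem.Set String :=
  PySem.Set.ofList (producciones.map (·.1))

-- procesar's terminal set (its first component; its second, no_terminales, is pvNts)
def pvTerminales (nts : PySem.Set String) (producciones : List (String × List String)) : PySem.Set String :=
  producciones.foldl
    (fun t pr => pr.2.foldl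
      (fun t prod => PySem.Set.update t ((pvSyms prod).filter (fun s => !(PySem.Set.contains nts s)))) t)
    PySem.Set.empty

-- first = {nt: set() for nt in no_terminales}; key order taken as first-occurrence order
-- (Python's set-iteration order is not modelled; dict outputs are compared ignoring order).
def pvInit (nts : List String) : PVSt := nts.foldl (fun d X => d.insert X []) PySem.Dict.empty

-- the innermost 'for simbolo in produccion: … break / else: …' of A, threading cambiado
def pvStepA (term : PySem.Set String) (X : String) : List String → PVSt × Bool → PVSt × Bool
  | [], (st, ch) =>
      let fX := st.getD X []
      if none ∈ fX then (st, ch) else (st.insert X (PySem.Set.add fX none), true)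
  | s :: rest, (st, ch) =>
      if PySem.Set.contains term s then
        let fX := st.getD X []
        if some s ∈ fX then (st, ch) else (st.insert X (PySem.Set.add fX (some s)), true)
      else
        let fX := st.getD X []
        let fs := st.getD s []
        let agregados := fX.length
        let fX' := PySem.Set.update fX (PySem.Set.diff fs [none])
        let st' := st.insert X fX'
        let ch' := if fX'.length ≠ agregados then true else ch
        if none ∈ fs then pvStepA term X rest (st', ch') else (st', ch')

-- one iteration of the while body: 'for no_terminal, lista … for produccion …'
def pvPassA (term : PySem.Set String) (producciones : List (String × List String))
    (stch : PVSt × Bool) : PVSt × Bool :=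
  producciones.foldl
    (fun stch pr => pr.2.foldl (fun stch prod => pvStepA term pr.1 (pvSyms prod) stch) stch) stch

-- 'while cambiado' as fuelled recursion; each continuing pass strictly grows a table of
-- total size ≤ |nonterminals|*(|symbols|+1), so pvFuel passes are never exhausted;
-- equality with B is proved fuel by fuel for the common fuel value.
def pvLoopA (term : PySem.Set String) (producciones : List (String × List String)) :
    Nat → PVSt → PVSt
  | 0, st => st
  | fuel+1, st =>
      let r := pvPassA term producciones (st, false)
      if r.2 then pvLoopA term producciones fuel r.1 else r.1

def pvFuel (producciones : List (String × List String)) : Nat :=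
  (pvNts producciones).length *
    ((PySem.Set.ofList (producciones.flatMap (fun pr => pr.2.flatMap pvSyms))).length + 1) + 2

def primera_funcion (producciones : List (String × List String)) : List (String × List (Option String)) :=
  let nts := pvNts producciones
  let term := pvTerminales nts producciones
  (pvLoopA term producciones (pvFuel producciones) (pvInit nts)).items

-- ===== PORT B =====
-- absorb(x, syms): recursive walk along a production suffix; terminal test = key lookup
def pvAbsorb (X : String) : List String → PVSt → PVSt
  | [], st => st.insert X (PySem.Set.add (st.getD X []) none)
  | s :: rest, st =>
      if st.contains s then
        let fs := st.getD s []
        let st' := st.insert X (PySem.Set.update (st.getD X []) (PySem.Set.diff fs [none]))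
        if none ∈ fs then pvAbsorb X rest st' else st'
      else
        st.insert X (PySem.Set.add (st.getD X []) (some s))

def pvPassB (producciones : List (String × List String)) (st : PVSt) : PVSt :=
  producciones.foldl
    (fun st pr => pr.2.foldl (fun st prod => pvAbsorb pr.1 (pvSyms prod) st) st) st

-- sum(len(s) for s in first.values())
def pvSizeB (st : PVSt) : Nat := (st.values.map List.length).sum

-- 'while True: … if size unchanged: return first' as fuelled recursion (same fuel as A)
def pvLoopB (producciones : List (String × List String)) : Nat → PVSt → PVSt
  | 0, st => st
  | fuel+1, st =>
      let size := pvSizeB st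
      let st' := pvPassB producciones st
      if pvSizeB st' = size then st' else pvLoopB producciones fuel st'

def primera_funcion_alt (producciones : List (String × List String)) : List (String × List (Option String)) :=
  (pvLoopB producciones (pvFuel producciones) (pvInit (pvNts producciones))).items

-- ===== PRECONDITION & SPEC =====
def Spec_primera_funcion (producciones : List (String × List String)) (out : List (String × List (Option String))) : Prop := out = primera_funcion_alt producciones
instance (producciones : List (String × List String)) (out : List (String × List (Option String))) : Decidable (Spec_primera_funcion producciones out) := by unfold Spec_primera_funcion; infer_instance

-- ===== CLAIM (what is proved, stated in full; the proofs are below) =====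
def Claim_equal_primera_funcion : Prop := ∀ (producciones : List (String × List String)), Dom_primera_funcion producciones → Spec_primera_funcion producciones (primera_funcion producciones)

-- ===== LEMMAS AND PROOFS =====

-- growth of an items list: same key in each slot, each value extended by appending
def pvR (p q : String × List (Option String)) : Prop := p.1 = q.1 ∧ p.2 <+: q.2

def pvLSize (l : List (String × List (Option String))) : Nat :=
  (l.map (fun p => p.2.length)).sum

theorem pvF2_trans {l1 l2 l3 : List (String × List (Option String))}
    (h1 : List.Forall₂ pvR l1 l2) (h2 : List.Forall₂ pvR l2 l3) : List.Forall₂ pvR l1 l3 := by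
  induction h1 generalizing l3 with
  | nil => cases h2; exact List.Forall₂.nil
  | cons h _ ih =>
    cases h2 with
    | cons h' t' => exact List.Forall₂.cons ⟨h.1.trans h'.1, h.2.trans h'.2⟩ (ih t')

theorem pvF2_size_le {l1 l2 : List (String × List (Option String))}
    (h : List.Forall₂ pvR l1 l2) : pvLSize l1 ≤ pvLSize l2 := by
  induction h with
  | nil => exact le_refl _
  | cons hp _ ih =>
    simp only [pvLSize, List.map_cons, List.sum_cons] at *
    exact Nat.add_le_add hp.2.length_le ih

theorem pvF2_eq_of_size {l1 l2 : List (String × List (Option String))}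
    (h : List.Forall₂ pvR l1 l2) (hs : pvLSize l1 = pvLSize l2) : l1 = l2 := by
  induction h with
  | nil => rfl
  | @cons a b t1 t2 hp htl ih =>
    simp only [pvLSize, List.map_cons, List.sum_cons] at hs
    have h1 : a.2.length ≤ b.2.length := hp.2.length_le
    have h2 : pvLSize t1 ≤ pvLSize t2 := pvF2_size_le htl
    simp only [pvLSize] at h2
    have hv : a.2 = b.2 := hp.2.eq_of_length (by omega)
    have ht : t1 = t2 := ih (by simp only [pvLSize]; omega)
    have : a = b := Prod.ext hp.1 hv
    rw [this, ht]

def PVExt (st st' : PVSt) : Prop := List.Forall₂ pvR st.items st'.items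

theorem pvExt_refl (st : PVSt) : PVExt st st := by
  rw [PVExt, List.forall₂_same]; exact fun p _ => ⟨rfl, List.prefix_refl _⟩

theorem pvExt_trans {a b c : PVSt} (h1 : PVExt a b) (h2 : PVExt b c) : PVExt a c :=
  pvF2_trans h1 h2

theorem pvSizeB_eq_lsize (st : PVSt) : pvSizeB st = pvLSize st.items := by
  simp [pvSizeB, pvLSize, PySem.Dict.values, List.map_map]
  rfl

theorem pvExt_size_le {a b : PVSt} (h : PVExt a b) : pvSizeB a ≤ pvSizeB b := by
  rw [pvSizeB_eq_lsize, pvSizeB_eq_lsize]; exact pvF2_size_le h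

theorem pvExt_eq_iff_size {a b : PVSt} (h : PVExt a b) :
    a = b ↔ pvSizeB a = pvSizeB b := by
  constructor
  · rintro rfl; rfl
  · intro hs
    exact PySem.Dict.ext (pvF2_eq_of_size h (by rw [← pvSizeB_eq_lsize, ← pvSizeB_eq_lsize]; exact hs))

theorem pvExt_squeeze {st st1 r1 : PVSt} (h1 : PVExt st st1) (h2 : PVExt st1 r1)
    (h : r1 = st) : st1 = st := by
  have hs1 := pvExt_size_le h1
  have hs2 := pvExt_size_le h2
  have hss : pvSizeB r1 = pvSizeB st := by rw [h]
  exact ((pvExt_eq_iff_size h1).2 (by omega)).symm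

theorem pvFlagComb {st st1 r1 : PVSt} (h1 : PVExt st st1) (h2 : PVExt st1 r1) :
    (!decide (st1 = st) || !decide (r1 = st1)) = !decide (r1 = st) := by
  by_cases ha : r1 = st
  · have hb : st1 = st := pvExt_squeeze h1 h2 ha
    simp [ha, hb]
  · by_cases hb : st1 = st
    · have hc : ¬ r1 = st1 := by rw [hb]; exact ha
      simp [ha, hc]
    · simp [ha, hb]

-- inserting an extended value at an existing key is a pvR-growth; keys unchanged
theorem pvExt_insert (st : PVSt) (X : String) (v : List (Option String))
    (hnd : st.keys.Nodup) (hX : st.contains X = true) (hpre : st.getD X [] <+: v) :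
    PVExt st (st.insert X v) := by
  rw [PVExt, PySem.Dict.items_insert_of_contains st v hX, List.forall₂_map_right_iff,
    List.forall₂_same]
  intro p hp
  by_cases hk : p.1 = X
  · have hv : st.getD p.1 [] = p.2 :=
      PySem.Dict.getD_of_mem_items st (by exact hp) hnd []
    simp only [hk, beq_self_eq_true, if_pos]
    exact ⟨hk, by rw [← hv, hk]; exact hpre⟩
  · simp only [(beq_eq_false_iff_ne (a := p.1) (b := X)).mpr hk, Bool.false_eq_true, if_false]
    exact ⟨rfl, List.prefix_refl _⟩

theorem pvInsert_getD_self (st : PVSt) (X : String)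
    (hnd : st.keys.Nodup) (hX : st.contains X = true) :
    st.insert X (st.getD X []) = st := by
  apply PySem.Dict.ext
  rw [PySem.Dict.items_insert_of_contains st _ hX]
  conv_rhs => rw [← List.map_id st.items]
  apply List.map_congr_left
  intro p hp
  by_cases hk : p.1 = X
  · have hv : st.getD p.1 [] = p.2 :=
      PySem.Dict.getD_of_mem_items st (by exact hp) hnd []
    simp only [hk, beq_self_eq_true, if_pos, id]
    rw [← hk, hv]
  · simp [(beq_eq_false_iff_ne (a := p.1) (b := X)).mpr hk]

-- a value strictly extended at an existing key changes the table
theorem pvInsert_ne (st : PVSt) (X : String) (v : List (Option String))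
    (hlen : (st.getD X []).length ≠ v.length) : st.insert X v ≠ st := by
  intro h
  have := congrArg (fun d : PVSt => (PySem.Dict.getD d X []).length) h
  simp only [PySem.Dict.getD_insert_self] at this
  exact hlen this.symm

-- ===== the per-production step: A's walk = B's walk, growth, keys, flag = "changed" =====
theorem pvStep_ok (term : PySem.Set String) (N : List String) (hNd : N.Nodup)
    (X : String) (hX : X ∈ N) :
    ∀ (syms : List String), (∀ s ∈ syms, PySem.Set.contains term s = !decide (s ∈ N)) →
    ∀ (st : PVSt) (ch : Bool), st.keys = N →
      (pvStepA term X syms (st, ch)).1 = pvAbsorb X syms st ∧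
      PVExt st (pvStepA term X syms (st, ch)).1 ∧
      (pvStepA term X syms (st, ch)).1.keys = N ∧
      (pvStepA term X syms (st, ch)).2
        = (ch || !decide ((pvStepA term X syms (st, ch)).1 = st)) := by
  intro syms
  induction syms with
  | nil =>
    intro _ st ch hkeys
    have hnd : st.keys.Nodup := by rw [hkeys]; exact hNd
    have hc : st.contains X = true :=
      (PySem.Dict.contains_iff_mem_keys st X).2 (by rw [hkeys]; exact hX)
    by_cases hmem : (none : Option String) ∈ st.getD X []
    · have hadd : PySem.Set.add (st.getD X []) none = st.getD X [] := PySem.Set.add_of_mem hmem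
      have hB : pvAbsorb X [] st = st := by
        rw [pvAbsorb, hadd]; exact pvInsert_getD_self st X hnd hc
      simp only [pvStepA, if_pos hmem]
      exact ⟨hB.symm, pvExt_refl st, hkeys, by simp⟩
    · have hadd : PySem.Set.add (st.getD X []) none = st.getD X [] ++ [none] :=
        PySem.Set.add_of_not_mem hmem
      simp only [pvStepA, if_neg hmem, pvAbsorb]
      refine ⟨by trivial, ?_, ?_, ?_⟩
      · exact pvExt_insert st X _ hnd hc (by rw [hadd]; exact List.prefix_append _ _)
      · rw [PySem.Dict.keys_insert_of_contains st _ hc]; exact hkeys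
      · have hne := pvInsert_ne st X (PySem.Set.add (st.getD X []) none)
          (by rw [hadd]; simp)
        simp [hne]
  | cons s rest ih =>
    intro hsy st ch hkeys
    have hnd : st.keys.Nodup := by rw [hkeys]; exact hNd
    have hcX : st.contains X = true :=
      (PySem.Dict.contains_iff_mem_keys st X).2 (by rw [hkeys]; exact hX)
    have hterm : PySem.Set.contains term s = !decide (s ∈ N) := hsy s (List.mem_cons_self ..)
    have hcs : st.contains s = decide (s ∈ N) := by
      rw [PySem.Dict.contains_eq_decide_mem_keys, hkeys]
    by_cases hsN : s ∈ N
    · -- nonterminal: A's update branch, B's key-found branch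
      have ht : PySem.Set.contains term s = false := by rw [hterm]; simp [hsN]
      have hcs' : st.contains s = true := by rw [hcs]; simp [hsN]
      simp only [pvStepA, ht, Bool.false_eq_true, if_false, pvAbsorb, hcs', if_true]
      set fs := st.getD s [] with hfs
      set fX' := PySem.Set.update (st.getD X []) (PySem.Set.diff fs [none]) with hfX'
      set st' := st.insert X fX' with hst'
      have hpre : st.getD X [] <+: fX' := by
        rw [hfX', PySem.Set.update_eq_append_filter]; exact List.prefix_append _ _
      have hext : PVExt st st' := pvExt_insert st X fX' hnd hcX hpre
      have hkeys' : st'.keys = N := by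
        rw [hst', PySem.Dict.keys_insert_of_contains st _ hcX]; exact hkeys
      have hflag : (if fX'.length ≠ (st.getD X []).length then true else ch)
          = (ch || !decide (st' = st)) := by
        by_cases hlen : fX'.length = (st.getD X []).length
        · have hv : fX' = st.getD X [] := (hpre.eq_of_length hlen.symm).symm
          have hse : st' = st := by rw [hst', hv]; exact pvInsert_getD_self st X hnd hcX
          simp [hlen, hse]
        · have hne : st' ≠ st := pvInsert_ne st X fX' (fun h => hlen h.symm)
          simp [hlen, hne]
      rw [hflag]
      by_cases hnone : (none : Option String) ∈ fs
      · simp only [if_pos hnone]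
        have ihr := ih (fun x hx => hsy x (List.mem_cons_of_mem _ hx)) st'
          (ch || !decide (st' = st)) hkeys'
        refine ⟨ihr.1, pvExt_trans hext ihr.2.1, ihr.2.2.1, ?_⟩
        rw [ihr.2.2.2, Bool.or_assoc, pvFlagComb hext ihr.2.1]
      · simp only [if_neg hnone]
        exact ⟨by trivial, hext, hkeys', by trivial⟩
    · -- terminal: A's add/break, B's add-and-return
      have ht : PySem.Set.contains term s = true := by rw [hterm]; simp [hsN]
      have hcs' : st.contains s = false := by rw [hcs]; simp [hsN]
      simp only [pvStepA, ht, if_true, pvAbsorb, hcs', Bool.false_eq_true, if_false]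
      by_cases hmem : (some s) ∈ st.getD X []
      · have hadd : PySem.Set.add (st.getD X []) (some s) = st.getD X [] :=
          PySem.Set.add_of_mem hmem
        have hB : st.insert X (PySem.Set.add (st.getD X []) (some s)) = st := by
          rw [hadd]; exact pvInsert_getD_self st X hnd hcX
        simp only [if_pos hmem]
        exact ⟨hB.symm, pvExt_refl st, hkeys, by simp⟩
      · have hadd : PySem.Set.add (st.getD X []) (some s) = st.getD X [] ++ [some s] :=
          PySem.Set.add_of_not_mem hmem
        simp only [if_neg hmem]
        refine ⟨by trivial, ?_, ?_, ?_⟩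
        · exact pvExt_insert st X _ hnd hcX (by rw [hadd]; exact List.prefix_append _ _)
        · rw [PySem.Dict.keys_insert_of_contains st _ hcX]; exact hkeys
        · have hne := pvInsert_ne st X (PySem.Set.add (st.getD X []) (some s))
            (by rw [hadd]; simp)
          simp [hne]

-- fold over the production list of one nonterminal
theorem pvProds_ok (term : PySem.Set String) (N : List String) (hNd : N.Nodup)
    (X : String) (hX : X ∈ N) :
    ∀ (prods : List String),
      (∀ prod ∈ prods, ∀ s ∈ pvSyms prod, PySem.Set.contains term s = !decide (s ∈ N)) →
    ∀ (st : PVSt) (ch : Bool), st.keys = N →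
      (prods.foldl (fun stch prod => pvStepA term X (pvSyms prod) stch) (st, ch)).1
        = prods.foldl (fun st prod => pvAbsorb X (pvSyms prod) st) st ∧
      PVExt st (prods.foldl (fun stch prod => pvStepA term X (pvSyms prod) stch) (st, ch)).1 ∧
      (prods.foldl (fun stch prod => pvStepA term X (pvSyms prod) stch) (st, ch)).1.keys = N ∧
      (prods.foldl (fun stch prod => pvStepA term X (pvSyms prod) stch) (st, ch)).2
        = (ch || !decide ((prods.foldl (fun stch prod => pvStepA term X (pvSyms prod) stch) (st, ch)).1 = st)) := by
  intro prods
  induction prods with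
  | nil => intro _ st ch hkeys; exact ⟨rfl, pvExt_refl st, hkeys, by simp⟩
  | cons prod rest ih =>
    intro hp st ch hkeys
    simp only [List.foldl_cons]
    obtain ⟨hB1, hext1, hkeys1, hflag1⟩ :=
      pvStep_ok term N hNd X hX (pvSyms prod) (hp prod (List.mem_cons_self ..)) st ch hkeys
    have ihr := ih (fun p hp' => hp p (List.mem_cons_of_mem _ hp'))
      (pvStepA term X (pvSyms prod) (st, ch)).1 (pvStepA term X (pvSyms prod) (st, ch)).2 hkeys1
    rw [Prod.mk.eta] at ihr
    refine ⟨by rw [ihr.1, hB1], pvExt_trans hext1 ihr.2.1, ihr.2.2.1, ?_⟩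
    rw [ihr.2.2.2, hflag1, Bool.or_assoc, pvFlagComb hext1 ihr.2.1]
    rfl

-- one whole pass (raw fold form): A's flagged pass = B's pass, growth, keys, flag
theorem pvPassF_ok (term : PySem.Set String) (N : List String) (hNd : N.Nodup) :
    ∀ (P : List (String × List String)),
      (∀ pr ∈ P, pr.1 ∈ N ∧
        ∀ prod ∈ pr.2, ∀ s ∈ pvSyms prod, PySem.Set.contains term s = !decide (s ∈ N)) →
    ∀ (st : PVSt) (ch : Bool), st.keys = N →
      (P.foldl (fun stch pr => pr.2.foldl (fun stch prod => pvStepA term pr.1 (pvSyms prod) stch) stch) (st, ch)).1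
        = P.foldl (fun st pr => pr.2.foldl (fun st prod => pvAbsorb pr.1 (pvSyms prod) st) st) st ∧
      PVExt st (P.foldl (fun stch pr => pr.2.foldl (fun stch prod => pvStepA term pr.1 (pvSyms prod) stch) stch) (st, ch)).1 ∧
      (P.foldl (fun stch pr => pr.2.foldl (fun stch prod => pvStepA term pr.1 (pvSyms prod) stch) stch) (st, ch)).1.keys = N ∧
      (P.foldl (fun stch pr => pr.2.foldl (fun stch prod => pvStepA term pr.1 (pvSyms prod) stch) stch) (st, ch)).2
        = (ch || !decide ((P.foldl (fun stch pr => pr.2.foldl (fun stch prod => pvStepA term pr.1 (pvSyms prod) stch) stch) (st, ch)).1 = st)) := by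
  intro P
  induction P with
  | nil => intro _ st ch hkeys; exact ⟨rfl, pvExt_refl st, hkeys, by simp⟩
  | cons pr rest ih =>
    intro hp st ch hkeys
    simp only [List.foldl_cons]
    have hpr := hp pr (List.mem_cons_self ..)
    obtain ⟨hB1, hext1, hkeys1, hflag1⟩ :=
      pvProds_ok term N hNd pr.1 hpr.1 pr.2 hpr.2 st ch hkeys
    have ihr := ih (fun q hq => hp q (List.mem_cons_of_mem _ hq))
      (pr.2.foldl (fun stch prod => pvStepA term pr.1 (pvSyms prod) stch) (st, ch)).1
      (pr.2.foldl (fun stch prod => pvStepA term pr.1 (pvSyms prod) stch) (st, ch)).2 hkeys1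
    rw [Prod.mk.eta] at ihr
    refine ⟨by rw [ihr.1, hB1], pvExt_trans hext1 ihr.2.1, ihr.2.2.1, ?_⟩
    rw [ihr.2.2.2, hflag1, Bool.or_assoc, pvFlagComb hext1 ihr.2.1]
    rfl

-- the two loops coincide, fuel by fuel
theorem pvLoop_ok (term : PySem.Set String) (N : List String) (hNd : N.Nodup)
    (P : List (String × List String))
    (hP : ∀ pr ∈ P, pr.1 ∈ N ∧
      ∀ prod ∈ pr.2, ∀ s ∈ pvSyms prod, PySem.Set.contains term s = !decide (s ∈ N)) :
    ∀ (fuel : Nat) (st : PVSt), st.keys = N →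
      pvLoopA term P fuel st = pvLoopB P fuel st := by
  intro fuel
  induction fuel with
  | zero => intro st _; rfl
  | succ n ih =>
    intro st hkeys
    obtain ⟨hB1, hext1, hkeys1, hflag1⟩ := pvPassF_ok term N hNd P hP st false hkeys
    simp only [pvLoopA, pvLoopB, pvPassA, pvPassB]
    rw [← hB1]
    by_cases he : (P.foldl (fun stch pr => pr.2.foldl (fun stch prod => pvStepA term pr.1 (pvSyms prod) stch) stch) (st, false)).1 = st
    · have hch : (P.foldl (fun stch pr => pr.2.foldl (fun stch prod => pvStepA term pr.1 (pvSyms prod) stch) stch) (st, false)).2 = false := by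
        rw [hflag1]; simp [he]
      have hsz : pvSizeB (P.foldl (fun stch pr => pr.2.foldl (fun stch prod => pvStepA term pr.1 (pvSyms prod) stch) stch) (st, false)).1 = pvSizeB st := by
        rw [he]
      rw [hch, if_pos hsz]
      simp
    · have hch : (P.foldl (fun stch pr => pr.2.foldl (fun stch prod => pvStepA term pr.1 (pvSyms prod) stch) stch) (st, false)).2 = true := by
        rw [hflag1]; simp [he]
      have hsz : ¬ pvSizeB (P.foldl (fun stch pr => pr.2.foldl (fun stch prod => pvStepA term pr.1 (pvSyms prod) stch) stch) (st, false)).1 = pvSizeB st := by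
        intro h; exact he ((pvExt_eq_iff_size hext1).2 h.symm).symm
      rw [hch, if_neg hsz]
      simp only [if_true]
      exact ih _ hkeys1

-- ===== membership in procesar's terminal set =====
theorem pvTerm_inner (nts : PySem.Set String) (s : String) :
    ∀ (prods : List String) (t : PySem.Set String),
      s ∈ prods.foldl (fun t prod =>
          PySem.Set.update t ((pvSyms prod).filter (fun s => !(PySem.Set.contains nts s)))) t ↔
        s ∈ t ∨ ∃ prod ∈ prods, s ∈ pvSyms prod ∧ PySem.Set.contains nts s = false := by
  intro prods
  induction prods with
  | nil => intro t; simp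
  | cons p ps ih =>
    intro t
    rw [List.foldl_cons, ih, PySem.Set.mem_update]
    simp only [List.mem_filter, List.mem_cons, Bool.not_eq_true']
    constructor
    · rintro ((h | ⟨h1, h2⟩) | ⟨prod, hp, h⟩)
      · exact Or.inl h
      · exact Or.inr ⟨p, Or.inl rfl, h1, h2⟩
      · exact Or.inr ⟨prod, Or.inr hp, h⟩
    · rintro (h | ⟨prod, (rfl | hp), h⟩)
      · exact Or.inl (Or.inl h)
      · exact Or.inl (Or.inr h)
      · exact Or.inr ⟨prod, hp, h⟩

theorem pvTerm_mem (nts : PySem.Set String) (s : String) :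
    ∀ (P : List (String × List String)),
      s ∈ pvTerminales nts P ↔
        ∃ pr ∈ P, ∃ prod ∈ pr.2, s ∈ pvSyms prod ∧ PySem.Set.contains nts s = false := by
  have gen : ∀ (P : List (String × List String)) (t : PySem.Set String),
      s ∈ P.foldl (fun t pr => pr.2.foldl (fun t prod =>
          PySem.Set.update t ((pvSyms prod).filter (fun s => !(PySem.Set.contains nts s)))) t) t ↔
        s ∈ t ∨ ∃ pr ∈ P, ∃ prod ∈ pr.2, s ∈ pvSyms prod ∧ PySem.Set.contains nts s = false := by
    intro P
    induction P with
    | nil => intro t; simp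
    | cons pr rest ih =>
      intro t
      rw [List.foldl_cons, ih, pvTerm_inner]
      constructor
      · rintro ((h | ⟨prod, hp, h⟩) | ⟨q, hq, hh⟩)
        · exact Or.inl h
        · exact Or.inr ⟨pr, List.mem_cons_self .., prod, hp, h⟩
        · exact Or.inr ⟨q, List.mem_cons_of_mem _ hq, hh⟩
      · rintro (h | ⟨q, hq, prod, hp, h⟩)
        · exact Or.inl (Or.inl h)
        · rcases List.mem_cons.1 hq with rfl | hq'
          · exact Or.inl (Or.inr ⟨prod, hp, h⟩)
          · exact Or.inr ⟨q, hq', prod, hp, h⟩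
  intro P
  rw [pvTerminales, gen]
  simp [PySem.Set.empty]

-- the terminal test: for a symbol occurring in some production, membership in
-- procesar's terminal set is exactly "not a nonterminal"
theorem pvTerm_test (P : List (String × List String)) :
    ∀ pr ∈ P, pr.1 ∈ pvNts P ∧
      ∀ prod ∈ pr.2, ∀ s ∈ pvSyms prod,
        PySem.Set.contains (pvTerminales (pvNts P) P) s = !decide (s ∈ pvNts P) := by
  intro pr hpr
  refine ⟨(PySem.Set.mem_ofList _ _).2 (List.mem_map_of_mem hpr), ?_⟩
  intro prod hprod s hs
  by_cases hsN : s ∈ pvNts P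
  · have hnotin : s ∉ pvTerminales (pvNts P) P := by
      intro h
      rcases (pvTerm_mem (pvNts P) s P).1 h with ⟨_, _, _, _, _, hcf⟩
      rw [(PySem.Set.contains_iff _ _).2 hsN] at hcf
      simp at hcf
    simp only [hsN, decide_true, Bool.not_true]
    rw [← Bool.not_eq_true, PySem.Set.contains_iff]
    exact hnotin
  · have hin : s ∈ pvTerminales (pvNts P) P := by
      rw [pvTerm_mem]
      refine ⟨pr, hpr, prod, hprod, hs, ?_⟩
      rw [← Bool.not_eq_true, PySem.Set.contains_iff]
      exact hsN
    simp only [hsN, decide_false, Bool.not_false]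
    exact (PySem.Set.contains_iff _ _).2 hin

theorem pvInit_keys (nts : List String) : (pvInit nts).keys = PySem.Set.ofList nts := by
  rw [pvInit, PySem.Dict.keys_foldl_insert, PySem.Dict.keys_empty]
  rfl

-- ===== VERDICT (by name: the statement is the Claim_ definition above) =====
theorem primera_funcion_spec : Claim_equal_primera_funcion := by
  intro P _hDom
  show _ = _
  rw [primera_funcion, primera_funcion_alt]
  have hkeys : (pvInit (pvNts P)).keys = pvNts P := by
    rw [pvInit_keys, pvNts, PySem.Set.ofList_ofList]
  have hNd : (pvNts P : List String).Nodup := PySem.Set.nodup_ofList _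
  rw [pvLoop_ok (pvTerminales (pvNts P) P) (pvNts P) hNd P (pvTerm_test P)
    (pvFuel P) (pvInit (pvNts P)) hkeys]
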